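-- pv_equiv track=rewrite | github.com/pedrox86lopes/Home-Brew-Management | HomeBrew-Management-System/recipes/views.py | get_hop_type
-- ===== SOURCE A (Python) =====
-- def get_hop_type(name):
--     """Determine hop type from name"""
--     bittering_hops = ['magnum', 'warrior', 'chinook', 'columbus']
--     aroma_hops = ['citra', 'mosaic', 'amarillo', 'cascade']
--
--     name_lower = name.lower()
--     if any(h in name_lower for h in bittering_hops):
--         return 'bittering'
--     elif any(h in name_lower for h in aroma_hops):
--         return 'aroma'
--     else:
--         return 'dual'
-- ===== SOURCE B (Python) =====
-- # First-character dispatch: single left-to-right pass over the lowered name;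
-- # at each position consult a dict keyed by the next character for the keywords
-- # that could start there, accumulating which categories matched anywhere.
-- _BY_FIRST = {
--     'm': [('magnum', 0), ('mosaic', 1)],
--     'w': [('warrior', 0)],
--     'c': [('chinook', 0), ('columbus', 0), ('citra', 1), ('cascade', 1)],
--     'a': [('amarillo', 1)],
-- }
--
-- def get_hop_type(name):
--     s = name.lower()
--     found = [False, False]
--     for i in range(len(s)):
--         for kw, cat in _BY_FIRST.get(s[i], ()):
--             if s.startswith(kw, i):
--                 found[cat] = True
--     if found[0]:
--         return 'bittering'
--     if found[1]:
--         return 'aroma'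
--     return 'dual'
-- ===== Notes on version B (the rewrite author's own statement) =====
-- stated objective: alternative
-- what changed: Instead of testing each keyword list with a per-keyword substring scan, B makes a single left-to-right pass over the lowered name, dispatching at each position through a dict keyed by the current character to the keywords that could start there, and accumulates two category flags resolved after the pass (bittering before aroma).
import Mathlib
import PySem

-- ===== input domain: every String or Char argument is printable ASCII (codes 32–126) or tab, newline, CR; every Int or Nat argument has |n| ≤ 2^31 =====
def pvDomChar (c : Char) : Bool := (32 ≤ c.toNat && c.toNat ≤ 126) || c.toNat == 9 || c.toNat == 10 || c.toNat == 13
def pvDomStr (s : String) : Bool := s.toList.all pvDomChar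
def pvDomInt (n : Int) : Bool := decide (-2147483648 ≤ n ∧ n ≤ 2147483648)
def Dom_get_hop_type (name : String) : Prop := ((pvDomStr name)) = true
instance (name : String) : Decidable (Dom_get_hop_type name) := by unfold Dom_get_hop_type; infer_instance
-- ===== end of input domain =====

-- B replaces A's per-keyword substring scans by one left-to-right pass over the lowered
-- name with a first-character dispatch table and category flags (objective: alternative).

-- ===== PORT A =====
def get_hop_type (name : String) : String :=
  let bittering_hops := ["magnum", "warrior", "chinook", "columbus"]
  let aroma_hops := ["citra", "mosaic", "amarillo", "cascade"]
  let name_lower := PySem.Str.lower name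
  if bittering_hops.any (fun h => PySem.Str.isIn h name_lower) then "bittering"
  else if aroma_hops.any (fun h => PySem.Str.isIn h name_lower) then "aroma"
  else "dual"

-- ===== PORT B =====
-- _BY_FIRST: keywords that can start at a position, keyed by its character
-- (cat : Bool, true = bittering (index 0), false = aroma (index 1))
def hopsByFirst (c : Char) : List (List Char × Bool) :=
  if c = 'm' then [("magnum".toList, true), ("mosaic".toList, false)]
  else if c = 'w' then [("warrior".toList, true)]
  else if c = 'c' then [("chinook".toList, true), ("columbus".toList, true),
                        ("citra".toList, false), ("cascade".toList, false)]
  else if c = 'a' then [("amarillo".toList, false)]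
  else []

-- inner for-loop: try each dispatched keyword at the current position, updating the flags
def checkAt (suf : List Char) : List (List Char × Bool) → Bool × Bool → Bool × Bool
  | [], p => p
  | (kw, cat) :: rest, p =>
      checkAt suf rest
        (if kw.isPrefixOf suf then (if cat then (true, p.2) else (p.1, true)) else p)

-- outer for-loop over positions i (= successive suffixes of s)
def scanHops : List Char → Bool × Bool → Bool × Bool
  | [], p => p
  | c :: rest, p => scanHops rest (checkAt (c :: rest) (hopsByFirst c) p)

def get_hop_type_alt (name : String) : String :=
  let s := (PySem.Str.lower name).toList
  let found := scanHops s (false, false)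
  if found.1 then "bittering"
  else if found.2 then "aroma"
  else "dual"

-- ===== PRECONDITION & SPEC =====
def Spec_get_hop_type (name : String) (out : String) : Prop := out = get_hop_type_alt name
instance (name : String) (out : String) : Decidable (Spec_get_hop_type name out) := by unfold Spec_get_hop_type; infer_instance

-- ===== CLAIM (what is proved, stated in full; the proofs are below) =====
def Claim_equal_get_hop_type : Prop := ∀ (name : String), Dom_get_hop_type name → Spec_get_hop_type name (get_hop_type name)

-- ===== LEMMAS AND PROOFS =====

def bitterL : List (List Char) := ["magnum".toList, "warrior".toList, "chinook".toList, "columbus".toList]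
def aromaL : List (List Char) := ["citra".toList, "mosaic".toList, "amarillo".toList, "cascade".toList]

lemma magnum_chars : "magnum".toList = ['m','a','g','n','u','m'] := rfl
lemma warrior_chars : "warrior".toList = ['w','a','r','r','i','o','r'] := rfl
lemma chinook_chars : "chinook".toList = ['c','h','i','n','o','o','k'] := rfl
lemma columbus_chars : "columbus".toList = ['c','o','l','u','m','b','u','s'] := rfl
lemma citra_chars : "citra".toList = ['c','i','t','r','a'] := rfl
lemma mosaic_chars : "mosaic".toList = ['m','o','s','a','i','c'] := rfl
lemma amarillo_chars : "amarillo".toList = ['a','m','a','r','i','l','l','o'] := rfl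
lemma cascade_chars : "cascade".toList = ['c','a','s','c','a','d','e'] := rfl

lemma exists_mem_or_split {α : Type} (L : List α) (P Q : α → Prop) :
    (∃ x ∈ L, P x ∨ Q x) ↔ (∃ x ∈ L, P x) ∨ (∃ x ∈ L, Q x) := by
  constructor
  · rintro ⟨x, hx, hp | hq⟩
    · exact Or.inl ⟨x, hx, hp⟩
    · exact Or.inr ⟨x, hx, hq⟩
  · rintro (⟨x, hx, h⟩ | ⟨x, hx, h⟩)
    · exact ⟨x, hx, Or.inl h⟩
    · exact ⟨x, hx, Or.inr h⟩

-- the inner loop at a position sets the flags iff some keyword of the category starts there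
lemma checkAt_spec (c : Char) (s : List Char) (p : Bool × Bool) :
    checkAt (c :: s) (hopsByFirst c) p =
      (p.1 || decide (∃ kw ∈ bitterL, kw <+: c :: s),
       p.2 || decide (∃ kw ∈ aromaL, kw <+: c :: s)) := by
  by_cases hm : c = 'm' <;> by_cases hw : c = 'w' <;> by_cases hc : c = 'c' <;>
    by_cases ha : c = 'a' <;>
  simp_all [hopsByFirst, checkAt, bitterL, aromaL, magnum_chars, warrior_chars,
    chinook_chars, columbus_chars, citra_chars, mosaic_chars, amarillo_chars,
    cascade_chars, List.cons_prefix_cons] <;>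
  first
    | (split_ifs <;> simp_all)
    | (simp_all [Ne.symm hm, Ne.symm hw, Ne.symm hc, Ne.symm ha])

-- the whole pass sets the flags iff some keyword of the category occurs as an infix
lemma scanHops_spec (s : List Char) (p : Bool × Bool) :
    scanHops s p =
      (p.1 || decide (∃ kw ∈ bitterL, kw <:+: s),
       p.2 || decide (∃ kw ∈ aromaL, kw <:+: s)) := by
  induction s generalizing p with
  | nil =>
      simp [scanHops, bitterL, aromaL, List.infix_nil, magnum_chars, warrior_chars,
        chinook_chars, columbus_chars, citra_chars, mosaic_chars, amarillo_chars,
        cascade_chars]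
  | cons c rest ih =>
      rw [scanHops, ih, checkAt_spec]
      have h : ∀ L : List (List Char),
          ((decide (∃ kw ∈ L, kw <+: c :: rest) || decide (∃ kw ∈ L, kw <:+: rest)) =
            decide (∃ kw ∈ L, kw <:+: c :: rest)) := by
        intro L
        rw [← Bool.decide_or]
        refine decide_eq_decide.mpr ?_
        rw [← exists_mem_or_split]
        exact exists_congr fun kw =>
          and_congr_right fun _ => (List.infix_cons_iff).symm
      simp only [Bool.or_assoc, h]

-- ===== VERDICT (by name: the statement is the Claim_ definition above) =====
theorem get_hop_type_spec : Claim_equal_get_hop_type := by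
  intro name _
  unfold Spec_get_hop_type get_hop_type get_hop_type_alt
  simp only [scanHops_spec, Bool.false_or, List.any_cons, List.any_nil, Bool.or_false,
    bitterL, aromaL]
  simp [← PySem.Chars.isIn_iff_infix, Bool.decide_or]
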